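-- pv_equiv track=rewrite | github.com/taiduydinh/pypatternminer | pypatternminer/tsp.py | _parse_output_pattern_key
-- ===== SOURCE A (Python) =====
-- def _parse_output_pattern_key(line):
--     if "#SUP:" in line:
--         line = line.split("#SUP:", 1)[0]
--     tokens = line.strip().split()
--     key = []
--     itemset = []
--     for token in tokens:
--         if token == "-1":
--             key.append(tuple(itemset))
--             itemset = []
--         else:
--             try:
--                 itemset.append(int(token))
--             except ValueError:
--                 return None
--     if itemset:
--         key.append(tuple(itemset))
--     return tuple(key)
-- ===== SOURCE B (Python) =====
-- def _parse_output_pattern_key(line):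
--     if "#SUP:" in line:
--         line = line.split("#SUP:", 1)[0]
--     tokens = line.strip().split()
--     segments = []
--     start = 0
--     for i, tok in enumerate(tokens):
--         if tok == "-1":
--             segments.append(tokens[start:i])
--             start = i + 1
--     if start < len(tokens):
--         segments.append(tokens[start:])
--     try:
--         return tuple(tuple(int(t) for t in seg) for seg in segments)
--     except ValueError:
--         return None
-- ===== Notes on version B (the rewrite author's own statement) =====
-- stated objective: alternative
-- what changed: Replaced the single accumulator-flush loop (building each itemset while scanning, with a trailing flush) by a two-phase algorithm: first split the token list at the delimiter positions via enumerate+slicing, then convert all segments to int tuples in a second pass under one try/except.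
import Mathlib
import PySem

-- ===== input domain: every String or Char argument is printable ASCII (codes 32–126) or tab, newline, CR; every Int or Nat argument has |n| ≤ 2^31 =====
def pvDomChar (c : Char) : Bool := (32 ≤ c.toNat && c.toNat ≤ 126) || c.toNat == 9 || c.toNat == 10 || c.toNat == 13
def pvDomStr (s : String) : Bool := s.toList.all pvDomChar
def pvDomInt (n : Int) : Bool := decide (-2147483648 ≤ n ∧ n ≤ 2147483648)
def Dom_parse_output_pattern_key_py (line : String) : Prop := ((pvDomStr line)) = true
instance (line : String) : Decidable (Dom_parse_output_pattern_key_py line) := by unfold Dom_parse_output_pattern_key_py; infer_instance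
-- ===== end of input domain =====

-- B replaces A's accumulator-flush loop by split-at-delimiter-positions (index slicing) then a second conversion pass; alternative decomposition, same cost.

-- ===== PORT A =====
-- the for-loop of A: state (key, itemset); 'return None' on ValueError aborts the whole loop
def aLoop : List String → List (List Int) → List Int → Option (List (List Int) × List Int)
  | [], key, itemset => some (key, itemset)
  | t :: ts, key, itemset =>
    if t == "-1" then aLoop ts (key ++ [itemset]) []
    else
      match PySem.Int.ofStr? t with
      | some n => aLoop ts key (itemset ++ [n])
      | none => none

def parse_output_pattern_key_py (line : String) : Option (List (List Int)) :=
  let line :=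
    if PySem.Str.isIn "#SUP:" line then
      -- line.split("#SUP:", 1)[0]; sep ≠ "" always yields some nonempty list, so getD/headD defaults are unreachable
      ((PySem.Str.splitMax? line "#SUP:" 1).getD []).headD line
    else line
  let tokens := PySem.Str.split₀ (PySem.Str.strip line)
  match aLoop tokens [] [] with
  | none => none
  | some (key, itemset) => some (if itemset.isEmpty then key else key ++ [itemset])

-- ===== PORT B =====
-- tuple(int(t) for t in seg), ValueError → none
def convSeg : List String → Option (List Int)
  | [] => some []
  | t :: ts =>
    match PySem.Int.ofStr? t with
    | some n => (convSeg ts).map (n :: ·)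
    | none => none

-- tuple(tuple(…) for seg in segments) under the try/except
def convAll : List (List String) → Option (List (List Int))
  | [] => some []
  | s :: ss =>
    match convSeg s with
    | some xs => (convAll ss).map (xs :: ·)
    | none => none

def parse_output_pattern_key_py_alt (line : String) : Option (List (List Int)) :=
  let line :=
    if PySem.Str.isIn "#SUP:" line then
      -- line.split("#SUP:", 1)[0]; sep ≠ "" always yields some nonempty list, so getD/headD defaults are unreachable
      ((PySem.Str.splitMax? line "#SUP:" 1).getD []).headD line
    else line
  let tokens := PySem.Str.split₀ (PySem.Str.strip line)
  let p := (PySem.List.enumerate tokens 0).foldl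
      (fun (p : List (List String) × Int) it =>
        if it.2 == "-1" then (p.1 ++ [PySem.List.slice tokens (some p.2) (some it.1)], it.1 + 1)
        else p)
      ([], 0)
  let segments :=
    if p.2 < (tokens.length : Int) then p.1 ++ [PySem.List.slice tokens (some p.2) none] else p.1
  convAll segments

-- ===== PRECONDITION & SPEC =====
def Spec_parse_output_pattern_key_py (line : String) (out : Option (List (List Int))) : Prop := out = parse_output_pattern_key_py_alt line
instance (line : String) (out : Option (List (List Int))) : Decidable (Spec_parse_output_pattern_key_py line out) := by unfold Spec_parse_output_pattern_key_py; infer_instance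

-- ===== CLAIM (what is proved, stated in full; the proofs are below) =====
def Claim_equal_parse_output_pattern_key_py : Prop := ∀ (line : String), Dom_parse_output_pattern_key_py line → Spec_parse_output_pattern_key_py line (parse_output_pattern_key_py line)

-- ===== LEMMAS AND PROOFS =====

-- reference splitter: split the token list at "-1", keeping empty middle segments, dropping an empty tail
def refGo : List String → List String → List (List String)
  | [], cur => if cur.isEmpty then [] else [cur]
  | t :: ts, cur => if t == "-1" then cur :: refGo ts [] else refGo ts (cur ++ [t])

theorem convSeg_append (a b : List String) :
    convSeg (a ++ b) = match convSeg a with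
      | none => none
      | some xs => (convSeg b).map (xs ++ ·) := by
  induction a with
  | nil => simp only [List.nil_append, convSeg]; cases convSeg b <;> simp
  | cons t ts ih =>
    simp only [List.cons_append, convSeg, ih]
    cases PySem.Int.ofStr? t <;> cases convSeg ts <;> cases convSeg b <;> simp

theorem convAll_refGo_none (l : List String) (cur : List String)
    (h : convSeg cur = none) : convAll (refGo l cur) = none := by
  induction l generalizing cur with
  | nil =>
    have : ¬ cur.isEmpty := by
      intro hc
      rw [List.isEmpty_iff] at hc
      subst hc; simp [convSeg] at h
    simp [refGo, this, convAll, h]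
  | cons t ts ih =>
    by_cases ht : t == "-1"
    · simp [refGo, ht, convAll, h]
    · simp only [refGo, ht, Bool.false_eq_true, ite_false]
      apply ih
      rw [convSeg_append, h]

theorem aMain (l : List String) (key : List (List Int)) (itemset : List Int)
    (cur : List String) (h : convSeg cur = some itemset) :
    (match aLoop l key itemset with
     | none => none
     | some (k, i) => some (if i.isEmpty then k else k ++ [i]))
    = (convAll (refGo l cur)).map (key ++ ·) := by
  induction l generalizing key itemset cur with
  | nil =>
    have hiff : cur.isEmpty = itemset.isEmpty := by
      cases cur with
      | nil => simp [convSeg] at h; subst h; rfl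
      | cons c cs =>
        simp only [convSeg] at h
        cases hc : PySem.Int.ofStr? c <;> rw [hc] at h
        · simp at h
        · cases hcs : convSeg cs <;> rw [hcs] at h <;> simp at h
          subst h; rfl
    by_cases hc : cur.isEmpty
    · have hi : itemset.isEmpty := by rw [← hiff]; exact hc
      rw [List.isEmpty_iff] at hi
      simp [aLoop, refGo, hc, hi, convAll]
    · have hi : ¬ itemset.isEmpty := by rw [← hiff]; exact hc
      simp [aLoop, refGo, hc, hi, convAll, h]
  | cons t ts ih =>
    by_cases ht : t == "-1"
    · have := ih (key ++ [itemset]) [] [] (by simp [convSeg])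
      simp only [aLoop, ht, if_pos, refGo, convAll, h, this]
      cases convAll (refGo ts []) <;> simp
    · simp only [aLoop, ht, Bool.false_eq_true, ite_false, refGo]
      cases hn : PySem.Int.ofStr? t with
      | none =>
        rw [convAll_refGo_none ts (cur ++ [t]) (by rw [convSeg_append, h]; simp [convSeg, hn])]
        rfl
      | some n =>
        exact ih key (itemset ++ [n]) (cur ++ [t])
          (by rw [convSeg_append, h]; simp [convSeg, hn])

-- B's fold invariant: processing the suffix of tokens from index n, with start0 ≤ n,
-- the finished segment list is segs0 ++ refGo (suffix) (tokens[start0:n]).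
theorem bInv (tokens : List String) (rest : List String) (n : Nat)
    (segs0 : List (List String)) (start0 : Nat)
    (hs : start0 ≤ n) (hn : n ≤ tokens.length) (hd : tokens.drop n = rest) :
    (let p := (PySem.List.enumerate rest (n : Int)).foldl
        (fun (p : List (List String) × Int) it =>
          if it.2 == "-1" then (p.1 ++ [PySem.List.slice tokens (some p.2) (some it.1)], it.1 + 1)
          else p)
        (segs0, (start0 : Int));
      if p.2 < (tokens.length : Int) then p.1 ++ [PySem.List.slice tokens (some p.2) none] else p.1)
    = segs0 ++ refGo rest ((tokens.drop start0).take (n - start0)) := by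
  induction rest generalizing n segs0 start0 with
  | nil =>
    have hlen : tokens.length ≤ n := by
      have := congrArg List.length hd
      simp at this; omega
    have hcur : (tokens.drop start0).take (n - start0) = tokens.drop start0 := by
      apply List.take_of_length_le; simp; omega
    simp only [PySem.List.enumerate_nil, List.foldl_nil, refGo, hcur]
    by_cases hlt : start0 < tokens.length
    · have h1 : ((start0 : Int)) < (tokens.length : Int) := by exact_mod_cast hlt
      have h2 : ¬ (tokens.drop start0).isEmpty := by
        simp [List.isEmpty_iff]; omega
      simp [h1, h2, PySem.List.slice_from_natCast]
    · have h1 : ¬ ((start0 : Int)) < (tokens.length : Int) := by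
        intro hcon; exact hlt (by exact_mod_cast hcon)
      have h2 : (tokens.drop start0).isEmpty := by
        simp [List.isEmpty_iff, List.drop_eq_nil_iff]; omega
      simp [h1, h2]
  | cons t ts ih =>
    have hnlt : n < tokens.length := by
      have := congrArg List.length hd
      simp at this; omega
    have hget : tokens[n]? = some t := by
      have : (tokens.drop n)[0]? = some t := by rw [hd]; rfl
      simpa using this
    have hdrop : tokens.drop (n + 1) = ts := by
      have : (tokens.drop n).drop 1 = ts := by rw [hd]; rfl
      simpa [List.drop_drop] using this
    simp only [PySem.List.enumerate_cons, List.foldl_cons]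
    by_cases ht : t == "-1"
    · have hslice : PySem.List.slice tokens (some (start0 : Int)) (some (n : Int))
          = (tokens.drop start0).take (n - start0) := PySem.List.slice_natCast tokens start0 n
      have hcast : ((n : Int) + 1) = ((n + 1 : Nat) : Int) := by push_cast; ring
      simp only [ht, if_pos, hslice, hcast]
      rw [ih (n + 1) (segs0 ++ [(tokens.drop start0).take (n - start0)]) (n + 1)
            (le_refl _) (by omega) hdrop]
      simp [refGo, ht, List.append_assoc]
    · simp only [ht, Bool.false_eq_true, ite_false]
      rw [show ((n : Int) + 1) = ((n + 1 : Nat) : Int) by push_cast; ring] at *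
      rw [ih (n + 1) segs0 start0 (by omega) (by omega) hdrop]
      have hcur : (tokens.drop start0).take (n + 1 - start0)
          = (tokens.drop start0).take (n - start0) ++ [t] := by
        have hk : n + 1 - start0 = (n - start0) + 1 := by omega
        rw [hk, List.take_add_one]
        congr 1
        have : (tokens.drop start0)[n - start0]? = tokens[start0 + (n - start0)]? := by
          simp [List.getElem?_drop]
        rw [this, show start0 + (n - start0) = n by omega, hget]
        rfl
      simp [refGo, ht, hcur]

theorem main_tokens (tokens : List String) :
    (match aLoop tokens [] [] with
     | none => none
     | some (key, itemset) => some (if itemset.isEmpty then key else key ++ [itemset]))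
    = convAll (
        let p := (PySem.List.enumerate tokens 0).foldl
            (fun (p : List (List String) × Int) it =>
              if it.2 == "-1" then (p.1 ++ [PySem.List.slice tokens (some p.2) (some it.1)], it.1 + 1)
              else p)
            ([], 0);
        if p.2 < (tokens.length : Int) then p.1 ++ [PySem.List.slice tokens (some p.2) none] else p.1) := by
  have hb := bInv tokens tokens 0 [] 0 (le_refl 0) (Nat.zero_le _) rfl
  simp only [Nat.cast_zero, List.drop_zero, Nat.sub_zero, List.take_zero, List.nil_append] at hb ⊢
  have ha := aMain tokens [] [] [] (by simp [convSeg])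
  simp only [List.nil_append] at ha
  rw [hb, ha]
  cases convAll (refGo tokens []) <;> simp

-- ===== VERDICT (by name: the statement is the Claim_ definition above) =====
theorem parse_output_pattern_key_py_spec : Claim_equal_parse_output_pattern_key_py := by
  intro line _
  show parse_output_pattern_key_py line = parse_output_pattern_key_py_alt line
  simp only [parse_output_pattern_key_py, parse_output_pattern_key_py_alt]
  generalize PySem.Str.split₀ (PySem.Str.strip (if PySem.Str.isIn "#SUP:" line then
      ((PySem.Str.splitMax? line "#SUP:" 1).getD []).headD line
    else line)) = tks
  exact main_tokens tks
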